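-- pv_equiv track=rewrite | github.com/softwarefactory-project/zuulfmt | zuulfmt/__init__.py | split_blocks
-- ===== SOURCE A (Python) =====
-- from typing import List, Tuple
--
-- def split_blocks(content: str) -> Tuple[str, List[str]]:
--     """Split a YAML file into a list of block per element.
--
--     >>> nl = chr(10)
--     >>> split_blocks(nl + '- elem: 42' + nl + '  key: 44' + nl + '- other: 43')
--     ('', ['  elem: 42\\n  key: 44', '  other: 43'])
--     """
--
--     def remove_tick(line: str) -> str:
--         return "  " + line[2:] if line.startswith("- ") else line
--
--     block: List[str] = []
--     result: List[str] = []
--     header = content[: content.index("\n-")]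
--     lines = content[content.index("\n-") + 1 :].split("\n")
--     for line in map(str.rstrip, filter(lambda line: line != "", lines + ["-"])):
--         if line and line[0] == "-" and block:
--             result.append("\n".join(list(map(remove_tick, block))))
--             block = [line]
--         else:
--             block.append(line)
--     return header, result
-- ===== SOURCE B (Python) =====
-- from typing import List, Tuple
--
-- def split_blocks(content: str) -> Tuple[str, List[str]]:
--     """Split a YAML file into a header and a list of per-element blocks."""
--
--     def untick(line: str) -> str:
--         return "  " + line[2:] if line.startswith("- ") else line
--
--     cut = content.index("\n-")
--     header = content[:cut]
--     lines = [l.rstrip() for l in content[cut + 1:].split("\n") if l != ""]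
--     # Build the blocks back-to-front: walking the lines in reverse, each
--     # line starting with "-" closes the block accumulated so far.
--     result: List[str] = []
--     block: List[str] = []
--     for l in reversed(lines):
--         block.insert(0, untick(l))
--         if l.startswith("-"):
--             result.insert(0, "\n".join(block))
--             block = []
--     if block:
--         result.insert(0, "\n".join(block))
--     return header, result
-- ===== Notes on version B (the rewrite author's own statement) =====
-- stated objective: alternative
-- what changed: A runs a forward state machine over the lines with a sentinel '-' appended, carrying an open block that is flushed whenever a new '-' line arrives; B drops the sentinel and builds the blocks back-to-front, walking the lines in reverse and closing the accumulated block at each '-' line (plus one trailing flush), so no flush-on-next-start bookkeeping is needed.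
import Mathlib
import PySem

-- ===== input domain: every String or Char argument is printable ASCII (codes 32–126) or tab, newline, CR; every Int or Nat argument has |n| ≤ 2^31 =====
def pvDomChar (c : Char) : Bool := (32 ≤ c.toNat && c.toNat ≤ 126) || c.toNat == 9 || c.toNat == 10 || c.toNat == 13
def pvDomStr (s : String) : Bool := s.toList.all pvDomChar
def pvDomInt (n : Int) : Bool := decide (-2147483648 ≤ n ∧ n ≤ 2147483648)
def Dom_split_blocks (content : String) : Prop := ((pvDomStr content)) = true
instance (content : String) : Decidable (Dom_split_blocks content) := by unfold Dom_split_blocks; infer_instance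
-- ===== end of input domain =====

-- B rewrites A's forward flush-on-next-start state machine (with a sentinel "-") as a reverse
-- traversal that closes each block when its leading "-" line is reached; return values are equal
-- wherever A returns (A raises ValueError when "\n-" is absent — excluded by Pre_).

-- ===== PORT A =====
-- remove_tick
def pvRemoveTick (line : String) : String :=
  if PySem.Str.startswith line "- " then "  " ++ PySem.Str.slice line (some 2) none else line

-- the body of A's for-loop; state = (block, result)
def pvStepA (st : List String × List String) (line : String) : List String × List String :=
  if (line ≠ "" ∧ PySem.Str.pyGet? line 0 = some '-') ∧ st.1 ≠ [] then
    ([line], st.2 ++ [PySem.Str.join "\n" (st.1.map pvRemoveTick)])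
  else (st.1 ++ [line], st.2)

def split_blocks (content : String) : String × List String :=
  let idx := PySem.Str.find content "\n-"   -- content.index("\n-"): ValueError (idx = -1) excluded by Pre_
  let header := PySem.Str.slice content none (some idx)
  -- split("\n"): separator is the nonempty literal "\n", so split? never returns none
  let lines := (PySem.Str.split? (PySem.Str.slice content (some (idx + 1)) none) "\n").getD []
  let st := (((lines ++ ["-"]).filter (fun l => l ≠ "")).map PySem.Str.rstrip).foldl pvStepA ([], [])
  (header, st.2)

-- ===== PORT B =====
def pvUntick (line : String) : String :=
  if PySem.Str.startswith line "- " then "  " ++ PySem.Str.slice line (some 2) none else line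

-- B's reversed loop: structural recursion = iteration over `reversed(lines)` with state (block, result)
def pvGroupRev : List String → List String × List String
  | [] => ([], [])
  | l :: ls =>
    let br := pvGroupRev ls
    let block := pvUntick l :: br.1
    if PySem.Str.startswith l "-" then ([], PySem.Str.join "\n" block :: br.2) else (block, br.2)

def split_blocks_alt (content : String) : String × List String :=
  let idx := PySem.Str.find content "\n-"
  let header := PySem.Str.slice content none (some idx)
  let lines := (((PySem.Str.split? (PySem.Str.slice content (some (idx + 1)) none) "\n").getD []).filter
      (fun l => l ≠ "")).map PySem.Str.rstrip
  let br := pvGroupRev lines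
  (header, if br.1 ≠ [] then PySem.Str.join "\n" br.1 :: br.2 else br.2)

-- ===== PRECONDITION & SPEC =====
-- Pre_ excludes exactly the inputs where content.index("\n-") raises ValueError (A returns nothing there; B raises too).
def Pre_split_blocks (content : String) : Prop := PySem.Str.find content "\n-" ≠ -1
instance (content : String) : Decidable (Pre_split_blocks content) := by unfold Pre_split_blocks; infer_instance

def pvWitness_split_blocks : String := "\n- elem: 42\n  key: 44\n- other: 43"

def Spec_split_blocks (content : String) (out : String × List String) : Prop := out = split_blocks_alt content
instance (content : String) (out : String × List String) : Decidable (Spec_split_blocks content out) := by unfold Spec_split_blocks; infer_instance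

-- ===== CLAIM (what is proved, stated in full; the proofs are below) =====
def Claim_equal_split_blocks : Prop := ∀ (content : String), Dom_split_blocks content → Pre_split_blocks content → Spec_split_blocks content (split_blocks content)

-- ===== LEMMAS AND PROOFS =====

-- the list A's loop appends to `result`, with the open block passed along explicitly
def pvG : List String → List String → List String
  | _, [] => []
  | block, l :: ls =>
    if (l ≠ "" ∧ PySem.Str.pyGet? l 0 = some '-') ∧ block ≠ [] then
      PySem.Str.join "\n" (block.map pvRemoveTick) :: pvG [l] ls
    else pvG (block ++ [l]) ls

theorem pvFoldA_eq (ls : List String) (block res : List String) :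
    (ls.foldl pvStepA (block, res)).2 = res ++ pvG block ls := by
  induction ls generalizing block res with
  | nil => simp [pvG]
  | cons l ls ih =>
    simp only [List.foldl_cons, pvStepA, pvG]
    split_ifs with h
    · rw [ih]; simp
    · rw [ih]

-- A's start-of-block test `line and line[0] == "-"` is B's `line.startswith("-")`
theorem pvStart_iff (l : String) :
    (l ≠ "" ∧ PySem.Str.pyGet? l 0 = some '-') ↔ PySem.Chars.startswith l.toList ['-'] = true := by
  rw [PySem.Chars.startswith_iff, PySem.Str.pyGet?_eq, PySem.Chars.pyGet?_eq_listPyGet?,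
    PySem.List.pyGet?_zero]
  constructor
  · rintro ⟨hne, hget⟩
    cases hl : l.toList with
    | nil => rw [hl] at hget; simp at hget
    | cons c cs =>
      rw [hl] at hget
      simp at hget
      subst hget
      exact ⟨cs, rfl⟩
  · rintro ⟨t, ht⟩
    have hl : l.toList = '-' :: t := ht.symm
    refine ⟨?_, ?_⟩
    · intro h0; rw [h0] at hl; simp at hl
    · rw [hl]; rfl

theorem pvG_eq (ls : List String) : ∀ block : List String, block ≠ [] →
    pvG block (ls ++ ["-"]) =
      PySem.Str.join "\n" (block.map pvRemoveTick ++ (pvGroupRev ls).1) :: (pvGroupRev ls).2 := by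
  induction ls with
  | nil =>
    intro block hb
    have hc : (("-" : String) ≠ "" ∧ PySem.Str.pyGet? "-" 0 = some '-') ∧ block ≠ [] :=
      ⟨⟨by decide, by decide⟩, hb⟩
    simp [pvG, hc, pvGroupRev]
  | cons l ls ih =>
    intro block hb
    by_cases hs : PySem.Chars.startswith l.toList ['-'] = true
    · have hc : (l ≠ "" ∧ PySem.Str.pyGet? l 0 = some '-') ∧ block ≠ [] :=
        ⟨(pvStart_iff l).mpr hs, hb⟩
      simp only [List.cons_append, pvG, if_pos hc]
      rw [ih [l] (by simp)]
      simp [pvGroupRev, hs, pvRemoveTick, pvUntick]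
    · have hc : ¬ ((l ≠ "" ∧ PySem.Str.pyGet? l 0 = some '-') ∧ block ≠ []) := by
        rintro ⟨h1, -⟩; exact hs ((pvStart_iff l).mp h1)
      simp only [List.cons_append, pvG, if_neg hc]
      rw [ih (block ++ [l]) (by simp)]
      simp [pvGroupRev, hs, pvRemoveTick, pvUntick]

theorem pvResult_eq (lines : List String) :
    pvG [] (lines ++ ["-"]) =
      (if (pvGroupRev lines).1 ≠ [] then
        PySem.Str.join "\n" (pvGroupRev lines).1 :: (pvGroupRev lines).2
      else (pvGroupRev lines).2) := by
  cases lines with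
  | nil => simp [pvG, pvGroupRev]
  | cons l ls =>
    have hc : ¬ ((l ≠ "" ∧ PySem.Str.pyGet? l 0 = some '-') ∧ ([] : List String) ≠ []) := by
      rintro ⟨-, h⟩; exact h rfl
    simp only [List.cons_append, pvG, if_neg hc, List.nil_append]
    rw [pvG_eq ls [l] (by simp)]
    by_cases hs : PySem.Chars.startswith l.toList ['-'] = true
    · simp [pvGroupRev, hs, pvRemoveTick, pvUntick]
    · simp [pvGroupRev, hs, pvRemoveTick, pvUntick]

-- the sentinel "-" survives A's filter/rstrip pass unchanged
theorem pvSentinel_eq (raw : List String) :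
    ((raw ++ ["-"]).filter (fun l => l ≠ "")).map PySem.Str.rstrip =
      (raw.filter (fun l => l ≠ "")).map PySem.Str.rstrip ++ ["-"] := by
  rw [List.filter_append, List.map_append]
  congr 1

-- ===== VERDICT (by name: the statement is the Claim_ definition above) =====
theorem split_blocks_spec : Claim_equal_split_blocks := by
  intro content _ _
  unfold Spec_split_blocks split_blocks split_blocks_alt
  simp only
  refine Prod.ext rfl ?_
  simp only
  rw [pvSentinel_eq, pvFoldA_eq, List.nil_append, pvResult_eq]
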